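-- pv_equiv track=rewrite | github.com/ericmerle3789/Collatz-Junction-Theorem | research_log/R164_test_newton.py | enumerate_monotone_B
-- ===== SOURCE A (Python) =====
-- def enumerate_monotone_B(k, max_B):
--     if k == 1:
--         yield [max_B]
--         return
--     def _gen(remaining, num_boxes, current):
--         if num_boxes == 1:
--             yield current + [remaining]
--             return
--         for c in range(remaining + 1):
--             yield from _gen(remaining - c, num_boxes - 1, current + [c])
--     for gaps in _gen(max_B, k, []):
--         B = [0] * k
--         B[0] = gaps[0]
--         for j in range(1, k):
--             B[j] = B[j-1] + gaps[j]
--         yield B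
-- ===== SOURCE B (Python) =====
-- def _mono(n, lo, hi):
--     """Yield nondecreasing sequences of length n with values in [lo, hi], lex order."""
--     if n == 0:
--         yield []
--         return
--     for v in range(lo, hi + 1):
--         for rest in _mono(n - 1, v, hi):
--             yield [v] + rest
--
--
-- def enumerate_monotone_B(k, max_B):
--     if k == 1:
--         yield [max_B]
--         return
--     for prefix in _mono(k - 1, 0, max_B):
--         yield prefix + [max_B]
-- ===== Notes on version B (the rewrite author's own statement) =====
-- stated objective: simpler
-- what changed: B drops A's two-phase gaps-then-prefix-sum construction and recurses directly over the nondecreasing values themselves (each position ranges from the previous value to max_B, with max_B appended last), yielding the same sequences in the same lex order.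
import Mathlib
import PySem

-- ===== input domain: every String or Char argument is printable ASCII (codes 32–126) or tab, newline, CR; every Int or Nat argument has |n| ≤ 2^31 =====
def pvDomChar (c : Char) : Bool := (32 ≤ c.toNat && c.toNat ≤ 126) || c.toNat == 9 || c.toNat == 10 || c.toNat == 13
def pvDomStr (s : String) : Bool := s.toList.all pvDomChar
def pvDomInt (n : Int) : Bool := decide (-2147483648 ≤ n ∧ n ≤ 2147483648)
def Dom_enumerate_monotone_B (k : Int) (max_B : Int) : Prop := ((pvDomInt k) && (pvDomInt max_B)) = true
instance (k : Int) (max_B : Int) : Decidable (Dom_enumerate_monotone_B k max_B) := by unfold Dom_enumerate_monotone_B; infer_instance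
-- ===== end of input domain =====

-- B replaces A's gaps-then-prefix-sum enumeration by a direct recursion over the
-- nondecreasing values (each position ranging from the previous value to max_B,
-- with max_B appended last); same sequences in the same lex order (objective: simpler).

-- ===== PORT A =====
-- _gen(remaining, num_boxes, current); fuel bounds the recursion depth (num_boxes
-- decreases by 1 each call); fuel 0 corresponds to Python's unbounded recursion
-- (RecursionError), which Pre_ excludes.
def genA : Nat → Int → Int → List Int → List (List Int)
  | 0, _, _, _ => []
  | f+1, remaining, numBoxes, current =>
    if numBoxes == 1 then [current ++ [remaining]]
    else (PySem.List.pyRange 0 (remaining + 1) 1).flatMap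
      (fun c => genA f (remaining - c) (numBoxes - 1) (current ++ [c]))

def enumerate_monotone_B (k : Int) (max_B : Int) : List (List Int) :=
  if k == 1 then [[max_B]]
  else
    (genA (k.toNat + 1) max_B k []).map (fun gaps =>
      -- B = [0]*k; B[0] = gaps[0]  (gaps has length k ≥ 1 here, so index 0 is in range)
      let B0 := (List.replicate k.toNat (0 : Int)).set 0 (PySem.List.pyGetD gaps 0 0)
      -- for j in range(1, k): B[j] = B[j-1] + gaps[j]  (all indices in range here)
      (PySem.List.pyRange 1 k 1).foldl
        (fun B j => B.set j.toNat (PySem.List.pyGetD B (j - 1) 0 + PySem.List.pyGetD gaps j 0)) B0)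

-- ===== PORT B =====
-- _mono(n, lo, hi); fuel bounds the recursion depth (n decreases by 1 each call);
-- fuel 0 corresponds to Python's unbounded recursion (RecursionError), outside Pre_.
def monoAlt : Nat → Int → Int → Int → List (List Int)
  | 0, _, _, _ => []
  | f+1, n, lo, hi =>
    if n == 0 then [[]]
    else (PySem.List.pyRange lo (hi + 1) 1).flatMap
      (fun v => (monoAlt f (n - 1) v hi).map (fun rest => v :: rest))

def enumerate_monotone_B_alt (k : Int) (max_B : Int) : List (List Int) :=
  if k == 1 then [[max_B]]
  else (monoAlt ((k - 1).toNat + 1) (k - 1) 0 max_B).map (fun pfx => pfx ++ [max_B])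

-- ===== PRECONDITION & SPEC =====
-- Pre_ excludes k ≤ 0 with max_B ≥ 0, where Python A (and B) recurse without bound
-- and raise RecursionError; everywhere else both return normally.
def Pre_enumerate_monotone_B (k : Int) (max_B : Int) : Prop := 1 ≤ k ∨ max_B < 0
instance (k : Int) (max_B : Int) : Decidable (Pre_enumerate_monotone_B k max_B) := by
  unfold Pre_enumerate_monotone_B; infer_instance
def pvWitness_enumerate_monotone_B : Int × Int := (3, 2)

def Spec_enumerate_monotone_B (k : Int) (max_B : Int) (out : List (List Int)) : Prop := out = enumerate_monotone_B_alt k max_B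
instance (k : Int) (max_B : Int) (out : List (List Int)) : Decidable (Spec_enumerate_monotone_B k max_B out) := by unfold Spec_enumerate_monotone_B; infer_instance

-- ===== CLAIM (what is proved, stated in full; the proofs are below) =====
def Claim_equal_enumerate_monotone_B : Prop := ∀ (k : Int) (max_B : Int), Dom_enumerate_monotone_B k max_B → Pre_enumerate_monotone_B k max_B → Spec_enumerate_monotone_B k max_B (enumerate_monotone_B k max_B)

-- ===== LEMMAS AND PROOFS =====

-- Reference: gap vectors of length m+1 summing to r (A's _gen, accumulator-free).
def Gaps : Nat → Int → List (List Int)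
  | 0, r => [[r]]
  | m+1, r => (PySem.List.pyRange 0 (r + 1) 1).flatMap (fun c => (Gaps m (r - c)).map (c :: ·))

-- Reference: nondecreasing sequences of length m with values in [lo, hi].
def S : Nat → Int → Int → List (List Int)
  | 0, _, _ => [[]]
  | m+1, lo, hi => (PySem.List.pyRange lo (hi + 1) 1).flatMap (fun v => (S m v hi).map (v :: ·))

-- Running prefix sums starting from base b.
def psum : Int → List Int → List Int
  | _, [] => []
  | b, x :: xs => (b + x) :: psum (b + x) xs

theorem genA_eq (m : Nat) : ∀ (f : Nat) (r : Int) (cur : List Int), m < f →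
    genA f r ((m : Int) + 1) cur = (Gaps m r).map (cur ++ ·) := by
  induction m with
  | zero =>
    intro f r cur hf
    obtain ⟨f', rfl⟩ : ∃ f', f = f' + 1 := ⟨f - 1, by omega⟩
    simp [genA, Gaps]
  | succ m ih =>
    intro f r cur hf
    obtain ⟨f', rfl⟩ : ∃ f', f = f' + 1 := ⟨f - 1, by omega⟩
    have hne : ((((m + 1 : Nat) : Int) + 1) == 1) = false := by
      simp; push_cast; omega
    simp only [genA, hne, Bool.false_eq_true, if_false, Gaps, List.map_flatMap, List.map_map]
    apply List.flatMap_congr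
    intro c _
    have h1 : ((m + 1 : Nat) : Int) + 1 - 1 = (m : Int) + 1 := by push_cast; ring
    rw [h1, ih f' (r - c) (cur ++ [c]) (by omega)]
    simp [Function.comp]

theorem monoAlt_eq (m : Nat) : ∀ (f : Nat) (lo hi : Int), m < f →
    monoAlt f (m : Int) lo hi = S m lo hi := by
  induction m with
  | zero =>
    intro f lo hi hf
    obtain ⟨f', rfl⟩ : ∃ f', f = f' + 1 := ⟨f - 1, by omega⟩
    simp [monoAlt, S]
  | succ m ih =>
    intro f lo hi hf
    obtain ⟨f', rfl⟩ : ∃ f', f = f' + 1 := ⟨f - 1, by omega⟩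
    have hne : (((m + 1 : Nat) : Int) == 0) = false := by simp; omega
    have h1 : ((m + 1 : Nat) : Int) - 1 = (m : Int) := by push_cast; ring
    simp only [monoAlt, hne, Bool.false_eq_true, if_false, S, h1]
    apply List.flatMap_congr
    intro v _
    rw [ih f' v hi (by omega)]

theorem Gaps_length (m : Nat) : ∀ (r : Int) (g : List Int), g ∈ Gaps m r → g.length = m + 1 := by
  induction m with
  | zero => intro r g hg; simp [Gaps] at hg; simp [hg]
  | succ m ih =>
    intro r g hg
    simp only [Gaps, List.mem_flatMap, List.mem_map] at hg
    obtain ⟨c, _, g', hg', rfl⟩ := hg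
    simp [ih _ _ hg']

theorem psum_append (b : Int) (l1 l2 : List Int) :
    psum b (l1 ++ l2) = psum b l1 ++ psum (b + l1.sum) l2 := by
  induction l1 generalizing b with
  | nil => simp [psum]
  | cons x xs ih => simp [psum, ih, add_assoc]

theorem psum_getD_last (l : List Int) : ∀ (b : Int) (rest : List Int), l ≠ [] →
    (psum b l ++ rest).getD (l.length - 1) 0 = b + l.sum := by
  induction l with
  | nil => intro b rest h; exact absurd rfl h
  | cons x xs ih =>
    intro b rest _
    cases xs with
    | nil => simp [psum]
    | cons y tl =>
      have := ih (b + x) rest (by simp)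
      simpa [psum, add_assoc] using this

theorem set_append_len {α : Type} (l1 : List α) (x v : α) (l2 : List α) :
    (l1 ++ x :: l2).set l1.length v = l1 ++ v :: l2 := by
  induction l1 with
  | nil => simp
  | cons a as ih => simp [ih]

theorem PSloop (g : List Int) (n : Nat) (hg : g.length = n) (hn : 2 ≤ n) :
    ∀ t, t ≤ n - 1 →
    (List.range t).foldl
      (fun B i => B.set ((1 : Int) + (i : Int)).toNat
        (PySem.List.pyGetD B ((1 + (i : Int)) - 1) 0 + PySem.List.pyGetD g (1 + (i : Int)) 0))
      ((List.replicate n (0 : Int)).set 0 (PySem.List.pyGetD g 0 0))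
    = psum 0 (g.take (t + 1)) ++ List.replicate (n - 1 - t) 0 := by
  intro t
  induction t with
  | zero =>
    intro _
    obtain ⟨x, rest, rfl⟩ : ∃ x rest, g = x :: rest := by
      cases g with
      | nil => simp at hg; omega
      | cons x rest => exact ⟨x, rest, rfl⟩
    obtain ⟨n', rfl⟩ : ∃ n', n = n' + 1 := ⟨n - 1, by omega⟩
    simp [psum, List.replicate_succ, PySem.List.pyGetD]
  | succ t iht =>
    intro ht
    have ht' : t ≤ n - 1 := by omega
    rw [List.range_succ, List.foldl_append, iht ht', List.foldl_cons, List.foldl_nil]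
    have hcast : (1 : Int) + (t : Int) = ((t + 1 : Nat) : Int) := by push_cast; ring
    have hsub : ((t + 1 : Nat) : Int) - 1 = ((t : Nat) : Int) := by push_cast; ring
    rw [hcast, hsub, Int.toNat_natCast, PySem.List.pyGetD_natCast, PySem.List.pyGetD_natCast]
    have hlenP : (psum 0 (g.take (t + 1))).length = t + 1 := by
      have : (g.take (t + 1)).length = t + 1 := by simp [hg]; omega
      clear iht
      generalize g.take (t + 1) = l at this ⊢
      rw [← this]
      clear this
      generalize (0 : Int) = b
      induction l generalizing b with
      | nil => simp [psum]
      | cons x xs ih => simp [psum, ih]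
    -- value read at index t = running sum of the first t+1 gaps
    have hread : (psum 0 (g.take (t + 1)) ++ List.replicate (n - 1 - t) 0).getD t 0
        = 0 + (g.take (t + 1)).sum := by
      have hne : g.take (t + 1) ≠ [] := by
        intro h
        have := congrArg List.length h
        simp [hg] at this
        omega
      have := psum_getD_last (g.take (t + 1)) 0 (List.replicate (n - 1 - t) 0) hne
      have hl : (g.take (t + 1)).length - 1 = t := by simp [hg]; omega
      rwa [hl] at this
    have hrep : List.replicate (n - 1 - t) (0 : Int) = 0 :: List.replicate (n - 1 - (t + 1)) 0 := by
      have : n - 1 - t = (n - 1 - (t + 1)) + 1 := by omega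
      rw [this, List.replicate_succ]
    have hset := set_append_len (psum 0 (g.take (t + 1)))
      (0 : Int) ((g.take (t + 1)).sum + g.getD (t + 1) 0) (List.replicate (n - 1 - (t + 1)) 0)
    rw [hlenP] at hset
    -- psum 0 (take (t+2) g) = psum 0 (take (t+1) g) ++ [sum + g[t+1]]
    have htk : g.take (t + 1 + 1) = g.take (t + 1) ++ [g.getD (t + 1) 0] := by
      have hlt : t + 1 < g.length := by omega
      rw [List.take_add_one]
      congr 1
      simp [List.getElem?_eq_getElem hlt]
    rw [hread, zero_add, hrep, hset, htk, psum_append]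
    simp [psum]

theorem PS (k : Int) (g : List Int) (hk : 2 ≤ k) (hg : g.length = k.toNat) :
    ((PySem.List.pyRange 1 k 1).foldl
      (fun B j => B.set j.toNat (PySem.List.pyGetD B (j - 1) 0 + PySem.List.pyGetD g j 0))
      ((List.replicate k.toNat (0 : Int)).set 0 (PySem.List.pyGetD g 0 0)))
    = psum 0 g := by
  have hn : 2 ≤ k.toNat := by omega
  rw [PySem.List.pyRange_one, List.foldl_map]
  have hkk : (k - 1).toNat = k.toNat - 1 := by omega
  rw [hkk]
  have := PSloop g k.toNat hg hn (k.toNat - 1) (le_refl _)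
  rw [this]
  have htk : g.take (k.toNat - 1 + 1) = g := by
    apply List.take_of_length_le; omega
  rw [htk]
  simp

theorem MAIN (m : Nat) : ∀ (r b : Int),
    (Gaps m r).map (psum b) = (S m b (b + r)).map (· ++ [b + r]) := by
  induction m with
  | zero => intro r b; simp [Gaps, S, psum]
  | succ m ih =>
    intro r b
    simp only [Gaps, S, List.map_flatMap, List.map_map]
    rw [PySem.List.pyRange_one 0 (r + 1), PySem.List.pyRange_one b (b + r + 1)]
    have h1 : (r + 1 - 0).toNat = (b + r + 1 - b).toNat := by omega
    rw [h1, List.flatMap_map, List.flatMap_map]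
    apply List.flatMap_congr
    intro i _
    have hc : b + (0 + (i : Int)) = b + (i : Int) := by ring
    have hsum : (b + (i : Int)) + (r - (0 + (i : Int))) = b + r := by ring
    calc ((Gaps m (r - (0 + (i : Int)))).map (fun g => psum b ((0 + (i : Int)) :: g)))
        = ((Gaps m (r - (0 + (i : Int)))).map (psum (b + (0 + (i : Int))))).map
            ((b + (0 + (i : Int))) :: ·) := by
          simp [psum, List.map_map, Function.comp]
      _ = ((S m (b + (0 + (i : Int))) (b + r)).map (· ++ [b + r])).map
            ((b + (0 + (i : Int))) :: ·) := by
          rw [ih (r - (0 + (i : Int))) (b + (0 + (i : Int)))]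
          rw [show (b + (0 + (i : Int))) + (r - (0 + (i : Int))) = b + r by ring]
      _ = (S m (b + (i : Int)) (b + r)).map (fun s => ((b + (i : Int)) :: s) ++ [b + r]) := by
          rw [show b + (0 + (i : Int)) = b + (i : Int) by ring]
          simp [List.map_map, Function.comp]

-- ===== VERDICT (by name: the statement is the Claim_ definition above) =====
theorem enumerate_monotone_B_spec : Claim_equal_enumerate_monotone_B := by
  intro k max_B _ hpre
  unfold Spec_enumerate_monotone_B enumerate_monotone_B enumerate_monotone_B_alt
  by_cases hk1 : k = 1
  · simp [hk1]
  · rw [if_neg (by simpa using hk1), if_neg (by simpa using hk1)]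
    by_cases hk2 : 2 ≤ k
    · have hn2 : 2 ≤ k.toNat := by omega
      set n := k.toNat with hn
      have hA : genA (n + 1) max_B k [] = Gaps (n - 1) max_B := by
        rw [show k = ((n - 1 : Nat) : Int) + 1 from by omega,
            genA_eq (n - 1) (n + 1) max_B [] (by omega)]
        simp
      have hB : monoAlt ((k - 1).toNat + 1) (k - 1) 0 max_B = S (n - 1) 0 max_B := by
        rw [show (k - 1).toNat = n - 1 from by omega,
            show (k - 1 : Int) = ((n - 1 : Nat) : Int) from by omega,
            monoAlt_eq (n - 1) (n - 1 + 1) 0 max_B (by omega)]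
      rw [hA, hB]
      trans ((Gaps (n - 1) max_B).map (psum 0))
      · exact List.map_congr_left (fun g hg => PS k g hk2
          (by have := Gaps_length (n - 1) max_B g hg; omega))
      · rw [MAIN (n - 1) max_B 0]
        simp
    · -- k ≤ 0, hence max_B < 0 by Pre_: both sides enumerate an empty range
      have hk0 : k ≤ 0 := by omega
      have hmb : max_B < 0 := by
        rcases hpre with h | h
        · omega
        · exact h
      have hr : PySem.List.pyRange 0 (max_B + 1) 1 = [] :=
        PySem.List.pyRange_one_eq_nil (by omega)
      have hkf : (k == 1) = false := by simp [hk1]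
      have hkg : ((k - 1) == 0) = false := by simp; omega
      rw [show k.toNat = 0 from by omega, show (k - 1).toNat = 0 from by omega]
      simp [genA, monoAlt, hr, hkf, hkg]
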